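-- pv_equiv track=rewrite | github.com/stef41/sentience2vec | md_simulations/prepare_structures_final.py | find_longest_stretch
-- ===== SOURCE A (Python) =====
-- def find_longest_stretch(residues: dict, max_gap: int = 2) -> list:
--     """Find longest continuous stretch allowing small gaps."""
--     if not residues:
--         return []
--
--     sorted_nums = sorted(residues.keys())
--     stretches = []
--     current = [sorted_nums[0]]
--
--     for i in range(1, len(sorted_nums)):
--         gap = sorted_nums[i] - sorted_nums[i-1]
--         if gap <= max_gap + 1:
--             current.append(sorted_nums[i])
--         else:
--             stretches.append(current)
--             current = [sorted_nums[i]]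
--     stretches.append(current)
--
--     # Return longest, filtered to only existing residues
--     longest = max(stretches, key=len)
--     return [n for n in longest if n in residues]
-- ===== SOURCE B (Python) =====
-- def find_longest_stretch(residues: dict, max_gap: int = 2) -> list:
--     """Find longest continuous stretch allowing small gaps."""
--     if not residues:
--         return []
--
--     nums = sorted(residues.keys())
--     cur_start = 0
--     best_start, best_len = 0, 0
--
--     for i in range(1, len(nums)):
--         if nums[i] - nums[i - 1] > max_gap + 1:
--             if i - cur_start > best_len:
--                 best_start, best_len = cur_start, i - cur_start
--             cur_start = i
--     if len(nums) - cur_start > best_len: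
--         best_start, best_len = cur_start, len(nums) - cur_start
--
--     return nums[best_start:best_start + best_len]
-- ===== Notes on version B (the rewrite author's own statement) =====
-- stated objective: alternative
-- what changed: B replaces A's materialisation of every stretch as a list of lists plus a final max(key=len) scan and a redundant membership filter by a single index-tracking pass that keeps only cur_start/best_start/best_len and returns one slice of the sorted keys.
import Mathlib
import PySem

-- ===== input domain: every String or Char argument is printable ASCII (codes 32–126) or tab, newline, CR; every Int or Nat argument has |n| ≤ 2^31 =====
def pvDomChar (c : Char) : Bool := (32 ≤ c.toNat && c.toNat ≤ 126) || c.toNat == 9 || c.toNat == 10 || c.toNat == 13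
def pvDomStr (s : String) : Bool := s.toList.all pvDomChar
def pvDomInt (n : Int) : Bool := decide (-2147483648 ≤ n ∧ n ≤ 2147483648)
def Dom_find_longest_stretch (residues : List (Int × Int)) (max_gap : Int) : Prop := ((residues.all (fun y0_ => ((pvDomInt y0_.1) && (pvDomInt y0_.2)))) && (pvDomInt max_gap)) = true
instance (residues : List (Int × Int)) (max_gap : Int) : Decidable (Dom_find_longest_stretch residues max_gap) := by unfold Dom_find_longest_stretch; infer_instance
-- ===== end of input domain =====

-- B replaces A's list-of-stretches + max(key=len) + filter by one index-tracking pass returning a single slice (objective: alternative).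

-- ===== PORT A =====
-- loop body of A's 'for i in range(1, len(sorted_nums))': state = (stretches, current)
def pvStepA (nums : List Int) (max_gap : Int) (st : List (List Int) × List Int) (i : Int) :
    List (List Int) × List Int :=
  let gap := PySem.List.pyGetD nums i 0 - PySem.List.pyGetD nums (i - 1) 0
  if gap ≤ max_gap + 1 then (st.1, st.2 ++ [PySem.List.pyGetD nums i 0])
  else (st.1 ++ [st.2], [PySem.List.pyGetD nums i 0])

def find_longest_stretch (residues : List (Int × Int)) (max_gap : Int) : List Int :=
  if residues = [] then []
  else
    let d := PySem.Dict.ofList residues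
    let sorted_nums := PySem.List.sorted d.keys (fun x => x) false
    let st := (PySem.List.pyRange 1 (sorted_nums.length : Int) 1).foldl
      (pvStepA sorted_nums max_gap) ([], [PySem.List.pyGetD sorted_nums 0 0])
    let stretches := st.1 ++ [st.2]
    -- max(stretches, key=len); stretches is provably nonempty, [] is the unreachable default
    let longest := PySem.List.maxD stretches (fun l => l.length) []
    longest.filter (fun n => d.contains n)

-- ===== PORT B =====
-- loop body of B's pass: state = (cur_start, best_start, best_len)
def pvStepB (nums : List Int) (max_gap : Int) (s : Int × Int × Int) (i : Int) :
    Int × Int × Int :=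
  if PySem.List.pyGetD nums i 0 - PySem.List.pyGetD nums (i - 1) 0 > max_gap + 1 then
    (i, if i - s.1 > s.2.2 then (s.1, i - s.1) else s.2)
  else s

def find_longest_stretch_alt (residues : List (Int × Int)) (max_gap : Int) : List Int :=
  if residues = [] then []
  else
    let nums := PySem.List.sorted (PySem.Dict.ofList residues).keys (fun x => x) false
    let n : Int := nums.length
    let s := (PySem.List.pyRange 1 n 1).foldl (pvStepB nums max_gap) (0, 0, 0)
    let best := if n - s.1 > s.2.2 then (s.1, n - s.1) else s.2
    PySem.List.slice nums (some best.1) (some (best.1 + best.2))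

-- ===== PRECONDITION & SPEC =====
def Spec_find_longest_stretch (residues : List (Int × Int)) (max_gap : Int) (out : List Int) : Prop := out = find_longest_stretch_alt residues max_gap
instance (residues : List (Int × Int)) (max_gap : Int) (out : List Int) : Decidable (Spec_find_longest_stretch residues max_gap out) := by unfold Spec_find_longest_stretch; infer_instance

-- ===== CLAIM (what is proved, stated in full; the proofs are below) =====
def Claim_equal_find_longest_stretch : Prop := ∀ (residues : List (Int × Int)) (max_gap : Int), Dom_find_longest_stretch residues max_gap → Spec_find_longest_stretch residues max_gap (find_longest_stretch residues max_gap)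

-- ===== LEMMAS AND PROOFS =====

-- length of a slice with in-range nonnegative bounds
theorem pvSliceLen (xs : List Int) {a b : Int} (h0 : 0 ≤ a) (hab : a ≤ b)
    (hb : b ≤ (xs.length : Int)) :
    ((PySem.List.slice xs (some a) (some b)).length : Int) = b - a := by
  rw [PySem.List.slice_toNat xs h0 (le_trans h0 hab)]
  simp [List.length_take, List.length_drop]
  omega

-- extending a slice by the next element
theorem pvSliceExtend (xs : List Int) {a m : Int} (h0 : 0 ≤ a) (ham : a ≤ m)
    (hm : m < (xs.length : Int)) :
    PySem.List.slice xs (some a) (some m) ++ [PySem.List.pyGetD xs m 0]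
      = PySem.List.slice xs (some a) (some (m + 1)) := by
  have h0m : (0 : Int) ≤ m := le_trans h0 ham
  rw [PySem.List.slice_toNat xs h0 h0m, PySem.List.slice_toNat xs h0 (by omega),
    PySem.List.pyGetD_eq_getElem xs 0 h0m hm]
  have h1 : (m + 1).toNat - a.toNat = (m.toNat - a.toNat) + 1 := by omega
  rw [h1, List.take_add_one]
  congr 1
  have h2 : (List.drop a.toNat xs)[m.toNat - a.toNat]? = xs[m.toNat]? := by
    rw [List.getElem?_drop]; congr 1; omega
  rw [h2, List.getElem?_eq_getElem (by omega)]
  rfl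

-- a one-element slice
theorem pvSliceSingleton (xs : List Int) {i : Int} (h0 : 0 ≤ i)
    (hi : i < (xs.length : Int)) :
    PySem.List.slice xs (some i) (some (i + 1)) = [PySem.List.pyGetD xs i 0] := by
  rw [← pvSliceExtend xs h0 le_rfl hi]
  rw [PySem.List.slice_toNat xs h0 h0]
  simp

-- Python's max(key=len) over stretches ++ [X], computed from the running best of stretches
theorem pvMaxAppend (S : List (List Int)) (X m : List Int) (bl : Int)
    (core : (PySem.List.max? S (fun l => l.length) = none ∧ bl = 0) ∨
      PySem.List.max? S (fun l => l.length) = some m)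
    (hm : (m.length : Int) = bl) (hx : 1 ≤ (X.length : Int)) :
    PySem.List.max? (S ++ [X]) (fun l => l.length)
      = some (if bl < (X.length : Int) then X else m) := by
  rcases core with ⟨hnone, hbl⟩ | hsome
  · simp only [PySem.List.max?] at hnone ⊢
    rw [List.foldl_append, hnone]
    simp only [List.foldl_cons, List.foldl_nil]
    rw [if_pos (by omega : bl < (X.length : Int))]
  · simp only [PySem.List.max?] at hsome ⊢
    rw [List.foldl_append, hsome]
    simp only [List.foldl_cons, List.foldl_nil]
    by_cases h : bl < (X.length : Int)
    · rw [if_pos h, if_pos (by omega : m.length < X.length)]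
    · rw [if_neg h, if_neg (by omega : ¬ m.length < X.length)]

-- a key of the association list is a key of the dict it builds
theorem pvMemKeysUpdate (ps : List (Int × Int)) (d : PySem.Dict Int Int) (k : Int)
    (h : (∃ v, (k, v) ∈ ps) ∨ k ∈ d.keys) : k ∈ (d.update ps).keys := by
  induction ps generalizing d with
  | nil =>
    rcases h with ⟨v, hv⟩ | hk
    · simp at hv
    · simpa [PySem.Dict.update] using hk
  | cons p rest ih =>
    obtain ⟨p1, p2⟩ := p
    have hstep : d.update ((p1, p2) :: rest) = (d.insert p1 p2).update rest := by
      simp [PySem.Dict.update]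
    rw [hstep]
    apply ih
    rcases h with ⟨v, hv⟩ | hk
    · rcases List.mem_cons.mp hv with h1 | h2
      · right
        rw [PySem.Dict.mem_keys_insert]
        left
        exact congrArg Prod.fst h1
      · exact Or.inl ⟨v, h2⟩
    · right
      rw [PySem.Dict.mem_keys_insert]
      exact Or.inr hk

-- the loop invariant tying A's (stretches, current) to B's (cur_start, best_start, best_len)
theorem pvInv (nums : List Int) (mg : Int) (k : Nat)
    (hk : k + 1 ≤ nums.length) :
    ∃ S C cs bs bl,
      (PySem.List.pyRange 1 (1 + (k : Int)) 1).foldl (pvStepA nums mg)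
        ([], [PySem.List.pyGetD nums 0 0]) = (S, C) ∧
      (PySem.List.pyRange 1 (1 + (k : Int)) 1).foldl (pvStepB nums mg) (0, 0, 0)
        = (cs, bs, bl) ∧
      0 ≤ cs ∧ cs ≤ (k : Int) ∧
      C = PySem.List.slice nums (some cs) (some (1 + (k : Int))) ∧
      0 ≤ bs ∧ 0 ≤ bl ∧ bs + bl ≤ (nums.length : Int) ∧
      ((PySem.List.slice nums (some bs) (some (bs + bl))).length : Int) = bl ∧
      ((PySem.List.max? S (fun l => l.length) = none ∧ bl = 0) ∨
        PySem.List.max? S (fun l => l.length)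
          = some (PySem.List.slice nums (some bs) (some (bs + bl)))) := by
  induction k with
  | zero =>
    refine ⟨[], [PySem.List.pyGetD nums 0 0], 0, 0, 0, ?_, ?_, le_rfl, le_rfl, ?_, le_rfl, le_rfl, by simp, ?_, ?_⟩
    · simp [PySem.List.pyRange_one_eq_nil]
    · simp [PySem.List.pyRange_one_eq_nil]
    · rw [show ((1 : Int) + ((0 : Nat) : Int)) = 0 + 1 by norm_num,
        pvSliceSingleton nums le_rfl (by exact_mod_cast hk)]
    · rw [show ((0 : Int) + 0) = 0 by norm_num,
        PySem.List.slice_toNat nums le_rfl le_rfl]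
      simp
    · left; exact ⟨by simp [PySem.List.max?], rfl⟩
  | succ k ih =>
    obtain ⟨S, C, cs, bs, bl, hA, hB, hcs0, hcsk, hC, hbs0, hbl0, hbsl, hlen, hcore⟩ :=
      ih (by omega)
    have hi : (1 : Int) ≤ 1 + (k : Int) := by omega
    have hsplit : PySem.List.pyRange 1 (1 + ((k : Nat) + 1 : Nat) : Int) 1
        = PySem.List.pyRange 1 (1 + (k : Int)) 1 ++ [1 + (k : Int)] := by
      push_cast
      rw [show (1 : Int) + ((k : Int) + 1) = (1 + (k : Int)) + 1 by ring]
      exact PySem.List.pyRange_one_succ_right hi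
    set i : Int := 1 + (k : Int) with hidef
    have hilen : i < (nums.length : Int) := by
      have : (k : Int) + 2 ≤ (nums.length : Int) := by exact_mod_cast hk
      omega
    have hClen : ((C.length : Int)) = i - cs := by
      rw [hC]
      exact pvSliceLen nums hcs0 (by omega) (by omega)
    rw [hsplit, List.foldl_append, List.foldl_append, hA, hB]
    simp only [List.foldl_cons, List.foldl_nil]
    by_cases hgap : PySem.List.pyGetD nums i 0 - PySem.List.pyGetD nums (i - 1) 0 ≤ mg + 1
    · -- small gap: extend the current run
      refine ⟨S, C ++ [PySem.List.pyGetD nums i 0], cs, bs, bl, ?_, ?_, hcs0, by omega, ?_, hbs0, hbl0, hbsl, hlen, hcore⟩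
      · simp [pvStepA, hgap]
      · simp [pvStepB, not_lt.mpr hgap]
      · rw [show ((1 : Int) + ((k + 1 : Nat) : Int)) = i + 1 from by rw [hidef]; push_cast; ring,
          hC, pvSliceExtend nums hcs0 (by omega) hilen]
    · -- big gap: close the current run, start a new one at i
      have hgap' : PySem.List.pyGetD nums i 0 - PySem.List.pyGetD nums (i - 1) 0 > mg + 1 :=
        lt_of_not_ge hgap
      have hCx : 1 ≤ (C.length : Int) := by omega
      by_cases hbetter : i - cs > bl
      · refine ⟨S ++ [C], [PySem.List.pyGetD nums i 0], i, cs, i - cs, ?_, ?_, by omega, by omega, ?_, hcs0, by omega, by omega, ?_, ?_⟩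
        · simp [pvStepA, hgap]
        · simp [pvStepB, hgap', hbetter]
        · rw [show ((1 : Int) + ((k + 1 : Nat) : Int)) = i + 1 from by rw [hidef]; push_cast; ring]
          exact (pvSliceSingleton nums (by omega) hilen).symm
        · rw [show cs + (i - cs) = i by ring]
          exact pvSliceLen nums hcs0 (by omega) (by omega)
        · right
          rw [pvMaxAppend S C (PySem.List.slice nums (some bs) (some (bs + bl))) bl hcore hlen hCx]
          rw [if_pos (by omega)]
          rw [hC, show cs + (i - cs) = i by ring]
      · refine ⟨S ++ [C], [PySem.List.pyGetD nums i 0], i, bs, bl, ?_, ?_, by omega, by omega, ?_, hbs0, hbl0, hbsl, hlen, ?_⟩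
        · simp [pvStepA, hgap]
        · simp [pvStepB, hgap', hbetter]
        · rw [show ((1 : Int) + ((k + 1 : Nat) : Int)) = i + 1 from by rw [hidef]; push_cast; ring]
          exact (pvSliceSingleton nums (by omega) hilen).symm
        · right
          rw [pvMaxAppend S C (PySem.List.slice nums (some bs) (some (bs + bl))) bl hcore hlen hCx]
          rw [if_neg (by omega)]

-- ===== VERDICT (by name: the statement is the Claim_ definition above) =====
theorem find_longest_stretch_spec : Claim_equal_find_longest_stretch := by
  intro residues max_gap _dom
  unfold Spec_find_longest_stretch
  rcases hres : residues with _ | ⟨⟨k0, v0⟩, rest⟩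
  · simp [find_longest_stretch, find_longest_stretch_alt]
  · rw [← hres]
    have hresne : residues ≠ [] := by rw [hres]; simp
    set d := PySem.Dict.ofList residues with hd
    set nums := PySem.List.sorted d.keys (fun x => x) false with hnums
    have hkeysne : d.keys ≠ [] := by
      intro hcon
      have : k0 ∈ d.keys := by
        apply pvMemKeysUpdate residues PySem.Dict.empty k0
        left; exact ⟨v0, by rw [hres]; simp⟩
      rw [hcon] at this; simp at this
    have hnumsne : nums ≠ [] := by
      rw [hnums]
      intro hcon
      exact hkeysne ((PySem.List.sorted_eq_nil_iff _ _ _).mp hcon)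
    have hlen1 : 1 ≤ nums.length := List.length_pos_iff.mpr hnumsne
    obtain ⟨S, C, cs, bs, bl, hA, hB, hcs0, hcsk, hC, hbs0, hbl0, hbsl, hlen, hcore⟩ :=
      pvInv nums max_gap (nums.length - 1) (by omega)
    have hn : 1 + ((nums.length - 1 : Nat) : Int) = (nums.length : Int) := by
      push_cast [hlen1]
      omega
    rw [hn] at hA hB hC
    have hcslt : cs ≤ (nums.length : Int) - 1 := by
      have h1 : ((nums.length - 1 : Nat) : Int) = (nums.length : Int) - 1 := by omega
      omega
    have hClen : (C.length : Int) = (nums.length : Int) - cs := by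
      rw [hC]; exact pvSliceLen nums hcs0 (by omega) le_rfl
    have hCx : 1 ≤ (C.length : Int) := by omega
    have hmax := pvMaxAppend S C (PySem.List.slice nums (some bs) (some (bs + bl))) bl
      hcore hlen hCx
    -- the value both sides return
    have hmemnums : ∀ x ∈ nums, d.contains x = true := by
      intro x hx
      rw [PySem.Dict.contains_iff_mem_keys]
      exact (PySem.List.mem_sorted _ _ _ _).mp (hnums ▸ hx)
    show find_longest_stretch residues max_gap = find_longest_stretch_alt residues max_gap
    simp only [find_longest_stretch, find_longest_stretch_alt, if_neg hresne]
    simp only [← hd, ← hnums, hA, hB, PySem.List.maxD, hmax]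
    rw [hClen] at hmax ⊢
    by_cases hwin : bl < (nums.length : Int) - cs
    · rw [if_pos hwin, if_pos (by omega : (nums.length : Int) - cs > bl)]
      rw [show cs + ((nums.length : Int) - cs) = (nums.length : Int) by ring, ← hC]
      simp only [Option.getD_some]
      apply List.filter_eq_self.mpr
      intro x hx
      exact hmemnums x (PySem.List.mem_of_mem_slice nums _ _ ((hC ▸ hx)))
    · rw [if_neg hwin, if_neg (by omega : ¬ ((nums.length : Int) - cs > bl))]
      simp only [Option.getD_some]
      apply List.filter_eq_self.mpr
      intro x hx
      exact hmemnums x (PySem.List.mem_of_mem_slice nums _ _ hx)
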